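-- pv_equiv track=rewrite | github.com/robinroy03/CompetitiveProgramming | VPROPEL POD/09-12-22/main.py | tailgate
-- ===== SOURCE A (Python) =====
-- def tailgate(x,y):
--     #to check if x>y : tailgate logic
--     #x and y are list elements : [1,1,2] [2,2,3] ...
--     k=list(zip(x,y))
--     for i in reversed(k):
--         if i[0] > i[1]:
--             return True     # swap
--         elif i[0] == i[1]:
--             pass            # wait till next iteration
--         else:
--             return False    # don't swap
-- ===== SOURCE B (Python) =====
-- def tailgate(x, y):
--     res = None
--     for a, b in zip(x, y):
--         if a != b:
--             res = a > b
--     return res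
-- ===== Notes on version B (the rewrite author's own statement) =====
-- stated objective: simpler
-- what changed: Replaces A's reversed early-return scan over zip(x,y) with a forward single pass that overwrites an accumulator at every differing position, so the last difference seen (the most significant one) is the answer and no reversal or early exit is needed.
import Mathlib
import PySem

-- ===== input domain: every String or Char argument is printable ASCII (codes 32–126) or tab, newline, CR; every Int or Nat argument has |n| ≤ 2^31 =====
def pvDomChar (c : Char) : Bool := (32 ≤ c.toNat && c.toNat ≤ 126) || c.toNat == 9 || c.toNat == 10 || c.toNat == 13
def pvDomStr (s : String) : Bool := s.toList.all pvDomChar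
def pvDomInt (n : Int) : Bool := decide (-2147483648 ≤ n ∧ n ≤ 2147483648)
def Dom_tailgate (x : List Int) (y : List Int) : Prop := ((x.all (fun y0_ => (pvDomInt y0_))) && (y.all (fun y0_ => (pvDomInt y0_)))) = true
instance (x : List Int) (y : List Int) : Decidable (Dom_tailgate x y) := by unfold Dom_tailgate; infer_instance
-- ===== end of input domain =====

-- B replaces A's reversed early-return scan over zip(x,y) with one forward pass that
-- overwrites an accumulator at every differing position (objective: simpler).

-- ===== PORT A =====
-- the for-loop over reversed(k): first pair with x-component > y-component → True,
-- first pair with x-component < y-component → False, equal pairs skipped, exhausted → None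
def tailgateLoop : List (Int × Int) → Option Bool
  | [] => none
  | i :: rest =>
      if i.1 > i.2 then some true
      else if i.1 == i.2 then tailgateLoop rest
      else some false

def tailgate (x : List Int) (y : List Int) : Option Bool :=
  let k := x.zip y
  tailgateLoop k.reverse

-- ===== PORT B =====
-- forward fold: res starts at none; each differing pair overwrites res with (a > b)
def tailgate_alt (x : List Int) (y : List Int) : Option Bool :=
  (x.zip y).foldl (fun res p => if p.1 ≠ p.2 then some (decide (p.1 > p.2)) else res) none

-- ===== PRECONDITION & SPEC =====
def Spec_tailgate (x : List Int) (y : List Int) (out : Option Bool) : Prop := out = tailgate_alt x y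
instance (x : List Int) (y : List Int) (out : Option Bool) : Decidable (Spec_tailgate x y out) := by unfold Spec_tailgate; infer_instance

-- ===== CLAIM (what is proved, stated in full; the proofs are below) =====
def Claim_equal_tailgate : Prop := ∀ (x : List Int) (y : List Int), Dom_tailgate x y → Spec_tailgate x y (tailgate x y)

-- ===== LEMMAS AND PROOFS =====

-- the backward early-return scan distributes over append via Option.or
theorem tailgateLoop_append (m n : List (Int × Int)) :
    tailgateLoop (m ++ n) = Option.or (tailgateLoop m) (tailgateLoop n) := by
  induction m with
  | nil => simp [tailgateLoop]
  | cons p rest ih =>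
      simp only [List.cons_append, tailgateLoop]
      split_ifs <;> simp [ih]

-- forward fold with accumulator acc = backward scan of the reverse, defaulting to acc
theorem foldl_eq_loop_reverse (l : List (Int × Int)) (acc : Option Bool) :
    l.foldl (fun res p => if p.1 ≠ p.2 then some (decide (p.1 > p.2)) else res) acc
      = Option.or (tailgateLoop l.reverse) acc := by
  induction l generalizing acc with
  | nil => simp [tailgateLoop]
  | cons p rest ih =>
      simp only [List.foldl_cons, List.reverse_cons, tailgateLoop_append, ih]
      cases h : tailgateLoop rest.reverse with
      | some b => simp [Option.or]
      | none =>
          simp only [Option.or]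
          simp only [tailgateLoop]
          rcases lt_trichotomy p.1 p.2 with hlt | heq | hgt
          · have h1 : ¬ p.1 > p.2 := by omega
            have h2 : (p.1 == p.2) = false := by simp; omega
            have h3 : p.1 ≠ p.2 := by omega
            simp [h1, h2, h3]
          · simp [heq]
          · have h3 : p.1 ≠ p.2 := by omega
            simp [hgt, h3]

-- ===== VERDICT (by name: the statement is the Claim_ definition above) =====
theorem tailgate_spec : Claim_equal_tailgate := by
  intro x y _
  unfold Spec_tailgate tailgate tailgate_alt
  rw [foldl_eq_loop_reverse]
  cases tailgateLoop (x.zip y).reverse <;> rfl
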